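-- pv_equiv track=rewrite | github.com/Alex-Davo/project | chess/ai.py | heur
-- ===== SOURCE A (Python) =====
-- def heur(fenstring) -> int:
--     value = 0
--     moveString = fenstring.split(' ')
--     fenstring = moveString[0]
--     for char in fenstring:
--         if char == 'p':
--             value -= 1
--         elif char == 'P':
--             value += 1
--         elif char == 'n' or char == 'b':
--             value -= 3
--         elif char == 'N' or char == 'B':
--             value += 3
--         elif char == 'r':
--             value -= 5
--         elif char == 'R':
--             value += 5
--         elif char == 'q':
--             value -= 9
--         elif char == 'Q':
--             value += 9
--     return value
-- ===== SOURCE B (Python) =====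
-- def heur(fenstring) -> int:
--     board = fenstring.split(' ')[0]
--     counts = {}
--     for ch in board:
--         counts[ch] = counts.get(ch, 0) + 1
--     values = {'p': -1, 'P': 1, 'n': -3, 'b': -3, 'N': 3, 'B': 3,
--               'r': -5, 'R': 5, 'q': -9, 'Q': 9}
--     return sum(counts.get(piece, 0) * val for piece, val in values.items())
-- ===== Notes on version B (the rewrite author's own statement) =====
-- stated objective: idiomatic
-- what changed: B replaces A's nine-way if/elif accumulation over every character by a tabulate-then-weighted-sum: build a character frequency table of the board field once, then fold a signed piece-value dict against the counts.
import Mathlib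
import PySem

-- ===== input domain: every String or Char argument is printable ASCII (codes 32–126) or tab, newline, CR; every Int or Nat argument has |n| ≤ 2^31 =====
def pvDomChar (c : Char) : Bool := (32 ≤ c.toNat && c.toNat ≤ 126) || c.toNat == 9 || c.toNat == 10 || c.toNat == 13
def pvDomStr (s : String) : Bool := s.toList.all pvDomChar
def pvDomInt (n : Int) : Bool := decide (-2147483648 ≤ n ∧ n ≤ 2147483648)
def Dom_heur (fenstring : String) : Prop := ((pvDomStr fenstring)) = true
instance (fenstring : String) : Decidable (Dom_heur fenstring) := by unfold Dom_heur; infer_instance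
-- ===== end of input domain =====

-- B changes A's per-character if/elif accumulator into a frequency table folded against a
-- signed piece-value dict (tabulate then weighted sum); same cost, more idiomatic.

-- ===== PORT A =====
-- the body of A's for-loop, named so the proofs can refer to it
def heurStep : Int → Char → Int := fun value char =>
  if char = 'p' then value - 1
  else if char = 'P' then value + 1
  else if char = 'n' ∨ char = 'b' then value - 3
  else if char = 'N' ∨ char = 'B' then value + 3
  else if char = 'r' then value - 5
  else if char = 'R' then value + 5
  else if char = 'q' then value - 9
  else if char = 'Q' then value + 9
  else value

def heur (fenstring : String) : Int :=
  let moveString := (PySem.Str.split? fenstring " ").getD []   -- sep ≠ "", split? is always some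
  -- moveString[0]: split(' ') always yields a non-empty list, so index 0 never raises; getD "" is exact
  let fen := (PySem.List.pyGet? moveString 0).getD ""
  fen.toList.foldl heurStep 0

-- ===== PORT B =====
def heurValues : List (Char × Int) :=
  [('p', -1), ('P', 1), ('n', -3), ('b', -3), ('N', 3), ('B', 3),
   ('r', -5), ('R', 5), ('q', -9), ('Q', 9)]

def heur_alt (fenstring : String) : Int :=
  let board := ((PySem.Str.split? fenstring " ").getD []).headD ""   -- split(' ')[0]: never raises
  let counts : PySem.Dict Char Int :=
    board.toList.foldl (fun d ch => d.insert ch (d.getD ch 0 + 1)) PySem.Dict.empty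
  (heurValues.map (fun pv => counts.getD pv.1 0 * pv.2)).sum

-- ===== PRECONDITION & SPEC =====
def Spec_heur (fenstring : String) (out : Int) : Prop := out = heur_alt fenstring
instance (fenstring : String) (out : Int) : Decidable (Spec_heur fenstring out) := by unfold Spec_heur; infer_instance

-- ===== CLAIM (what is proved, stated in full; the proofs are below) =====
def Claim_equal_heur : Prop := ∀ (fenstring : String), Dom_heur fenstring → Spec_heur fenstring (heur fenstring)

-- ===== LEMMAS AND PROOFS =====

-- one step of A's accumulator equals adding the table-weighted indicator of the character
theorem heurStep_eq (acc : Int) (a : Char) :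
    heurStep acc a
      = acc + (heurValues.map (fun pv => (if a == pv.1 then (1 : Int) else 0) * pv.2)).sum := by
  by_cases h1 : a = 'p'
  · subst h1; (simp [heurStep, heurValues]; try omega)
  by_cases h2 : a = 'P'
  · subst h2; (simp [heurStep, heurValues]; try omega)
  by_cases h3 : a = 'n'
  · subst h3; (simp [heurStep, heurValues]; try omega)
  by_cases h4 : a = 'b'
  · subst h4; (simp [heurStep, heurValues]; try omega)
  by_cases h5 : a = 'N'
  · subst h5; (simp [heurStep, heurValues]; try omega)
  by_cases h6 : a = 'B'
  · subst h6; (simp [heurStep, heurValues]; try omega)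
  by_cases h7 : a = 'r'
  · subst h7; (simp [heurStep, heurValues]; try omega)
  by_cases h8 : a = 'R'
  · subst h8; (simp [heurStep, heurValues]; try omega)
  by_cases h9 : a = 'q'
  · subst h9; (simp [heurStep, heurValues]; try omega)
  by_cases h10 : a = 'Q'
  · subst h10; (simp [heurStep, heurValues]; try omega)
  simp [heurStep, heurValues, h1, h2, h3, h4, h5, h6, h7, h8, h9, h10]

-- A's whole loop equals the counts-weighted table sum
theorem table_sum_eq (cs : List Char) (acc : Int) :
    cs.foldl heurStep acc
      = acc + (heurValues.map (fun pv => ((cs.count pv.1 : Int)) * pv.2)).sum := by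
  induction cs generalizing acc with
  | nil => simp [heurValues]
  | cons a l ih =>
      rw [List.foldl_cons, ih, heurStep_eq]
      simp only [heurValues, List.map_cons, List.map_nil, List.sum_cons, List.sum_nil,
        List.count_cons]
      push_cast [apply_ite (fun n : Nat => (n : Int))]
      ring

theorem headD_eq (l : List String) :
    (PySem.List.pyGet? l 0).getD "" = l.headD "" := by
  cases l <;> simp [PySem.List.pyGet?, PySem.List.pyIdx?]

theorem heur_spec : Claim_equal_heur := by
  intro s _
  simp only [Spec_heur, heur, heur_alt]
  rw [headD_eq, table_sum_eq]
  simp [PySem.Dict.getD_foldl_insert_add_one]
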